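-- pv_equiv track=rewrite | github.com/cd0g05/TreePickupOptimizer | src/tree_pickup/team_generator.py | generate_team_names
-- ===== SOURCE A (Python) =====
-- NATO_ALPHABET = [
--     "Alpha",
--     "Bravo",
--     "Charlie",
--     "Delta",
--     "Echo",
--     "Foxtrot",
--     "Golf",
--     "Hotel",
--     "India",
--     "Juliet",
--     "Kilo",
--     "Lima",
--     "Mike",
--     "November",
--     "Oscar",
--     "Papa",
--     "Quebec",
--     "Romeo",
--     "Sierra",
--     "Tango",
--     "Uniform",
--     "Victor",
--     "Whiskey",
--     "X-ray",
--     "Yankee",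
--     "Zulu",
-- ]
--
-- def generate_team_names(count: int) -> list[str]:
--     """
--     Generate team names using NATO phonetic alphabet.
--
--     For counts > 26, cycles through alphabet with numbers appended.
--
--     Args:
--         count: Number of team names to generate
--
--     Returns:
--         List of team names like "Team Alpha", "Team Bravo", etc.
--     """
--     names = []
--
--     for i in range(count):
--         cycle = i // len(NATO_ALPHABET)
--         idx = i % len(NATO_ALPHABET)
--
--         if cycle == 0:
--             names.append(f"Team {NATO_ALPHABET[idx]}")
--         else:
--             names.append(f"Team {NATO_ALPHABET[idx]} {cycle + 1}")
--
--     return names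
-- ===== SOURCE B (Python) =====
-- NATO_ALPHABET = [
--     "Alpha", "Bravo", "Charlie", "Delta", "Echo", "Foxtrot", "Golf",
--     "Hotel", "India", "Juliet", "Kilo", "Lima", "Mike", "November",
--     "Oscar", "Papa", "Quebec", "Romeo", "Sierra", "Tango", "Uniform",
--     "Victor", "Whiskey", "X-ray", "Yankee", "Zulu",
-- ]
--
--
-- def generate_team_names(count: int) -> list[str]:
--     """Generate team names cycle by cycle: one whole (or final partial)
--     pass over the NATO alphabet per outer iteration, no per-name divmod."""
--     names = []
--     remaining = count
--     cycle = 0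
--     while remaining > 0:
--         take = min(remaining, 26)
--         for j in range(take):
--             if cycle == 0:
--                 names.append("Team {}".format(NATO_ALPHABET[j]))
--             else:
--                 names.append("Team {} {}".format(NATO_ALPHABET[j], cycle + 1))
--         remaining -= take
--         cycle += 1
--     return names
-- ===== Notes on version B (the rewrite author's own statement) =====
-- stated objective: alternative
-- what changed: Replaces the flat loop over range(count) with per-index divmod by a nested loop over whole alphabet cycles: an outer while on the remaining count and an inner loop over the first min(remaining, 26) letters, so no floor division or modulus is computed per name.
import Mathlib
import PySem

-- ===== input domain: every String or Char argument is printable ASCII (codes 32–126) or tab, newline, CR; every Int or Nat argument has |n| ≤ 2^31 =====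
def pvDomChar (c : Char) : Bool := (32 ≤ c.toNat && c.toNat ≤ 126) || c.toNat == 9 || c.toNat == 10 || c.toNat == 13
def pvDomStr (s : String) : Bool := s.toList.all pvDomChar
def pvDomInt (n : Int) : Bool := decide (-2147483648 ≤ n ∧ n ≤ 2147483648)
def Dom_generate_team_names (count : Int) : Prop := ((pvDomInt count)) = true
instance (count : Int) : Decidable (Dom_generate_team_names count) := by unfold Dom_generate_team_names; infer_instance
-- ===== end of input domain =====

-- B restructures A's flat loop (divmod per index) into nested loops over whole alphabet
-- cycles with the suffix computed once per cycle; same return value, no speed claim.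

def pvNATO : List String :=
  ["Alpha", "Bravo", "Charlie", "Delta", "Echo", "Foxtrot", "Golf",
   "Hotel", "India", "Juliet", "Kilo", "Lima", "Mike", "November",
   "Oscar", "Papa", "Quebec", "Romeo", "Sierra", "Tango", "Uniform",
   "Victor", "Whiskey", "X-ray", "Yankee", "Zulu"]

-- ===== PORT A =====
-- NATO_ALPHABET[idx] with idx = i % 26 is always in range, so pyGetD's default is never used.
def generate_team_names (count : Int) : List String :=
  (PySem.List.pyRange 0 count 1).foldl (fun names i =>
    let cycle := PySem.Int.floordiv i (PySem.List.len pvNATO)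
    let idx := PySem.Int.mod i (PySem.List.len pvNATO)
    if cycle == 0 then
      names ++ ["Team " ++ PySem.List.pyGetD pvNATO idx ""]
    else
      names ++ ["Team " ++ PySem.List.pyGetD pvNATO idx "" ++ " " ++ PySem.Int.toStr (cycle + 1)]) []

-- ===== PORT B =====
-- NATO_ALPHABET[j] with 0 ≤ j < take ≤ 26 is always in range, so pyGetD's default is never used;
-- "Team {} {}".format(letter, cycle+1) is exactly "Team " ++ letter ++ " " ++ str(cycle+1).
def pvAltAux (names : List String) (remaining : Int) (cycle : Int) : List String :=
  if 0 < remaining then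
    let take := min remaining 26
    let names' := (PySem.List.pyRange 0 take 1).foldl
      (fun acc j =>
        if cycle == 0 then
          acc ++ ["Team " ++ PySem.List.pyGetD pvNATO j ""]
        else
          acc ++ ["Team " ++ PySem.List.pyGetD pvNATO j "" ++ " " ++ PySem.Int.toStr (cycle + 1)]) names
    pvAltAux names' (remaining - take) (cycle + 1)
  else names
termination_by remaining.toNat
decreasing_by omega

def generate_team_names_alt (count : Int) : List String := pvAltAux [] count 0

-- ===== PRECONDITION & SPEC =====
def Spec_generate_team_names (count : Int) (out : List String) : Prop := out = generate_team_names_alt count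
instance (count : Int) (out : List String) : Decidable (Spec_generate_team_names count out) := by unfold Spec_generate_team_names; infer_instance

-- ===== CLAIM (what is proved, stated in full; the proofs are below) =====
def Claim_equal_generate_team_names : Prop := ∀ (count : Int), Dom_generate_team_names count → Spec_generate_team_names count (generate_team_names count)

-- ===== LEMMAS AND PROOFS =====

/-- The name at absolute position `n` (0-based). -/
def pvName (n : Nat) : String :=
  if n / 26 = 0 then "Team " ++ pvNATO.getD (n % 26) ""
  else "Team " ++ pvNATO.getD (n % 26) "" ++ " " ++ PySem.Int.toStr ((n / 26 : Nat) + 1)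

/-- The body of A's loop, as a single appended element. -/
def pvElem (i : Int) : String :=
  if PySem.Int.floordiv i (PySem.List.len pvNATO) == 0 then
    "Team " ++ PySem.List.pyGetD pvNATO (PySem.Int.mod i (PySem.List.len pvNATO)) ""
  else
    "Team " ++ PySem.List.pyGetD pvNATO (PySem.Int.mod i (PySem.List.len pvNATO)) "" ++ " " ++
      PySem.Int.toStr (PySem.Int.floordiv i (PySem.List.len pvNATO) + 1)

/-- The body of B's inner loop, as a single appended element. -/
def pvBElem (c : Int) (j : Int) : String :=
  if c == 0 then "Team " ++ PySem.List.pyGetD pvNATO j ""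
  else "Team " ++ PySem.List.pyGetD pvNATO j "" ++ " " ++ PySem.Int.toStr (c + 1)

theorem pvA_eq (count : Int) :
    generate_team_names count = (List.range count.toNat).map pvName := by
  unfold generate_team_names
  have hbody : (fun (names : List String) (i : Int) =>
      let cycle := PySem.Int.floordiv i (PySem.List.len pvNATO)
      let idx := PySem.Int.mod i (PySem.List.len pvNATO)
      if cycle == 0 then
        names ++ ["Team " ++ PySem.List.pyGetD pvNATO idx ""]
      else
        names ++ ["Team " ++ PySem.List.pyGetD pvNATO idx "" ++ " " ++ PySem.Int.toStr (cycle + 1)])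
      = (fun names i => names ++ [pvElem i]) := by
    funext names i
    simp only [pvElem]
    split <;> rfl
  rw [hbody, PySem.List.pyRange_one, List.foldl_map, PySem.List.foldl_append_singleton_eq_map]
  simp only [List.nil_append, Int.sub_zero]
  apply List.map_congr_left
  intro n _
  simp only [pvElem]
  have h26 : PySem.List.len pvNATO = ((26 : Nat) : Int) := by decide
  have hfd : PySem.Int.floordiv ((0 : Int) + (n : Int)) (PySem.List.len pvNATO)
      = ((n / 26 : Nat) : Int) := by
    rw [h26]; simpa using PySem.Int.floordiv_natCast n 26
  have hmd : PySem.Int.mod ((0 : Int) + (n : Int)) (PySem.List.len pvNATO)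
      = ((n % 26 : Nat) : Int) := by
    rw [h26]; simpa using PySem.Int.mod_natCast n 26
  simp only [hfd, hmd, PySem.List.pyGetD_natCast, pvName]
  by_cases h0 : n / 26 = 0
  · simp [h0]
  · have hb : ¬ (((n / 26 : Nat) : Int) == 0) = true := by
      simpa using fun h => h0 (by exact_mod_cast h)
    rw [if_neg hb, if_neg h0]

theorem pvB_eq (r : Int) (c : Nat) (names : List String) :
    pvAltAux names r (c : Int) =
      names ++ (List.range r.toNat).map (fun j => pvName (26 * c + j)) := by
  generalize hm : r.toNat = m
  induction m using Nat.strong_induction_on generalizing r c names with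
  | _ m ih =>
    rw [pvAltAux]
    by_cases hr : 0 < r
    · simp only [if_pos hr]
      set t : Int := min r 26 with ht
      have ht0 : 0 < t := by omega
      have htle : t ≤ r := by omega
      -- the inner loop appends the t names of this cycle
      have hinner : (PySem.List.pyRange 0 t 1).foldl
          (fun acc j =>
            if (c : Int) == 0 then
              acc ++ ["Team " ++ PySem.List.pyGetD pvNATO j ""]
            else
              acc ++ ["Team " ++ PySem.List.pyGetD pvNATO j "" ++ " " ++
                PySem.Int.toStr ((c : Int) + 1)]) names
          = names ++ (List.range t.toNat).map (fun j => pvName (26 * c + j)) := by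
        have hbodyB : (fun (acc : List String) (j : Int) =>
            if (c : Int) == 0 then
              acc ++ ["Team " ++ PySem.List.pyGetD pvNATO j ""]
            else
              acc ++ ["Team " ++ PySem.List.pyGetD pvNATO j "" ++ " " ++
                PySem.Int.toStr ((c : Int) + 1)])
            = (fun acc j => acc ++ [pvBElem (c : Int) j]) := by
          funext acc j
          simp only [pvBElem]
          split <;> rfl
        rw [hbodyB, PySem.List.pyRange_one, List.foldl_map, PySem.List.foldl_append_singleton_eq_map]
        simp only [Int.sub_zero, zero_add]
        congr 1
        apply List.map_congr_left
        intro j hj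
        have hjlt : j < 26 := by
          have := List.mem_range.mp hj; omega
        have hdiv : (26 * c + j) / 26 = c := by omega
        have hmod : (26 * c + j) % 26 = j := by omega
        simp only [pvBElem, pvName, hdiv, hmod, PySem.List.pyGetD_natCast]
        by_cases hc : c = 0
        · subst hc; simp
        · have hc' : ¬ (((c : Nat) : Int) == 0) = true := by
            simpa using fun h => hc (by exact_mod_cast h)
          rw [if_neg hc', if_neg hc]
      simp only [hinner]
      have hc1 : ((c : Int) + 1) = ((c + 1 : Nat) : Int) := by push_cast; ring
      subst hm
      rw [hc1, ih (r - t).toNat (by omega) (r - t) (c + 1) _ rfl, List.append_assoc]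
      congr 1
      have hsplit : r.toNat = t.toNat + (r - t).toNat := by omega
      rw [hsplit, List.range_add, List.map_append, List.map_map]
      congr 1
      by_cases h26 : t = 26
      · apply List.map_congr_left
        intro j _
        have h26' : t.toNat = 26 := by omega
        simp only [Function.comp, h26']
        congr 1
        omega
      · -- partial final cycle: r ≤ 26, nothing remains
        have h0 : (r - t).toNat = 0 := by omega
        simp [h0]
    · simp only [if_neg hr]
      have h0 : r.toNat = 0 := by omega
      rw [← hm, h0]
      simp

-- ===== VERDICT (by name: the statement is the Claim_ definition above) =====
theorem generate_team_names_spec : Claim_equal_generate_team_names := by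
  intro count _
  unfold Spec_generate_team_names generate_team_names_alt
  rw [pvA_eq]
  have := pvB_eq count 0 []
  simp only [Nat.cast_zero] at this
  rw [this]
  simp
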